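-- pv_equiv track=rewrite | github.com/rkac2021/CS51Final | finalproject.py | new_func
-- ===== SOURCE A (Python) =====
-- def new_func(final_list):
--     """
--     The purpose of this function is to transform features from the final_list input into pieces of a dictionary. This
--     function checks whether a movies runtime falls within a key range in the t_dict and then proceeds to add one to the
--     0th element of the corresponding list as well as the profit to the 1st element of the list (the value is a list).
--
--     :param final_list: (list) We are using the returned list from the parse_profit function as the input for new func.
--     :return: (dict) We return a modified dictionary that gives us a runtime range and the corresponding number of times
--     this occurs along with the sum of the profits of the movies that fall into this range.
--     """
--     # initialize a runtime dict with [occurrences, total profit] values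
--     t_dict = {(70, 90): [0, 0], (90, 100): [0, 0], (100, 110): [0, 0], (110, 120): [0, 0], (120, 130): [0, 0],
--               (130, 140): [0, 0], (140, 150): [0, 0], (150, 220): [0, 0]}
--
--     # for each element in the final_list we are going through and checking whether the keys and adding to the lists
--     for element in final_list:
--         # for the range of keys in the dict we add the number of occurrences within a range plus the sum of profits
--         for bucket in t_dict:
--             if bucket[0] < element[0] <= bucket[1]:
--                 t_dict[bucket][0] += 1
--                 t_dict[bucket][1] += element[1]
--     return t_dict
-- ===== SOURCE B (Python) =====
-- def new_func(final_list):
--     keys = [(70, 90), (90, 100), (100, 110), (110, 120), (120, 130),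
--             (130, 140), (140, 150), (150, 220)]
--     counts = [0] * 8
--     profits = [0] * 8
--     for runtime, profit in final_list:
--         if runtime <= 70 or runtime > 220:
--             continue
--         if runtime <= 90:
--             idx = 0
--         elif runtime <= 150:
--             idx = (runtime - 91) // 10 + 1
--         else:
--             idx = 7
--         counts[idx] += 1
--         profits[idx] += profit
--     return {k: [c, p] for k, c, p in zip(keys, counts, profits)}
-- ===== Notes on version B (the rewrite author's own statement) =====
-- stated objective: alternative
-- what changed: Replaces A's inner scan over all eight dict buckets per element with an O(1) arithmetic bucket index into two parallel count/profit arrays, building the result dict once at the end.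
import Mathlib
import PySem

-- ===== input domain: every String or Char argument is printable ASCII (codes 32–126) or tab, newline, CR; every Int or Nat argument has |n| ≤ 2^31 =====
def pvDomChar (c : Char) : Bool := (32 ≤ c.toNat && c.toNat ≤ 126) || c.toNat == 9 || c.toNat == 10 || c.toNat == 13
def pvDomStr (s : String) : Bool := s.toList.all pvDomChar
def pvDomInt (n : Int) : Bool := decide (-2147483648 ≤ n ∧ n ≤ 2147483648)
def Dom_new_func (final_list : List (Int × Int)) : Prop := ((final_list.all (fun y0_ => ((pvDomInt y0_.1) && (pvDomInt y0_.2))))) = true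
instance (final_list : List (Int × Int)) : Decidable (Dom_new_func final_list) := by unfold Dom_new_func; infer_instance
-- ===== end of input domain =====

-- B replaces A's per-element scan over all eight dict buckets by an O(1) arithmetic bucket
-- index into two parallel accumulator lists, building the result dict once at the end
-- (objective: alternative; same return value).

-- ===== PORT A =====
-- one iteration of A's outer loop: the inner 'for bucket in t_dict' scan with in-place updates
def aStep (d : PySem.Dict (Int × Int) (List Int)) (element : Int × Int) :
    PySem.Dict (Int × Int) (List Int) :=
  d.keys.foldl (fun d' bucket =>
    if bucket.1 < element.1 ∧ element.1 ≤ bucket.2 then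
      let d1 := d'.modify bucket [] (fun v => PySem.List.pySetD v 0 (PySem.List.pyGetD v 0 0 + 1))
      d1.modify bucket [] (fun v => PySem.List.pySetD v 1 (PySem.List.pyGetD v 1 0 + element.2))
    else d') d

def new_func (final_list : List (Int × Int)) : List (Int × Int × List Int) :=
  let t0 : PySem.Dict (Int × Int) (List Int) :=
    PySem.Dict.ofList [((70, 90), [0, 0]), ((90, 100), [0, 0]), ((100, 110), [0, 0]),
      ((110, 120), [0, 0]), ((120, 130), [0, 0]), ((130, 140), [0, 0]),
      ((140, 150), [0, 0]), ((150, 220), [0, 0])]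
  let t := final_list.foldl aStep t0
  -- the returned dict rendered as an association list (type convention), tuples flattened
  t.items.map (fun kv => (kv.1.1, kv.1.2, kv.2))

-- ===== PORT B =====
def bKeys : List (Int × Int) :=
  [(70, 90), (90, 100), (100, 110), (110, 120), (120, 130), (130, 140), (140, 150), (150, 220)]

-- B's arithmetic bucket index (only evaluated for 70 < x ≤ 220)
def bIdx (x : Int) : Int :=
  if x ≤ 90 then 0
  else if x ≤ 150 then PySem.Int.floordiv (x - 91) 10 + 1
  else 7

-- one iteration of B's loop: skip out-of-range, else O(1) index into the two lists
def bStep (s : List Int × List Int) (el : Int × Int) : List Int × List Int :=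
  if el.1 ≤ 70 ∨ 220 < el.1 then s
  else
    (PySem.List.pySetD s.1 (bIdx el.1) (PySem.List.pyGetD s.1 (bIdx el.1) 0 + 1),
     PySem.List.pySetD s.2 (bIdx el.1) (PySem.List.pyGetD s.2 (bIdx el.1) 0 + el.2))

def new_func_alt (final_list : List (Int × Int)) : List (Int × Int × List Int) :=
  let s := final_list.foldl bStep ([0, 0, 0, 0, 0, 0, 0, 0], [0, 0, 0, 0, 0, 0, 0, 0])
  (bKeys.zip (s.1.zip s.2)).map (fun t => (t.1.1, t.1.2, [t.2.1, t.2.2]))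

-- ===== PRECONDITION & SPEC =====
def Spec_new_func (final_list : List (Int × Int)) (out : List (Int × Int × List Int)) : Prop := out = new_func_alt final_list
instance (final_list : List (Int × Int)) (out : List (Int × Int × List Int)) : Decidable (Spec_new_func final_list out) := by unfold Spec_new_func; infer_instance

-- ===== CLAIM (what is proved, stated in full; the proofs are below) =====
def Claim_equal_new_func : Prop := ∀ (final_list : List (Int × Int)), Dom_new_func final_list → Spec_new_func final_list (new_func final_list)

-- ===== LEMMAS AND PROOFS =====

-- the dict A maintains, as a function of the 16 accumulators B maintains
def mkD (c0 c1 c2 c3 c4 c5 c6 c7 p0 p1 p2 p3 p4 p5 p6 p7 : Int) :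
    PySem.Dict (Int × Int) (List Int) :=
  PySem.Dict.mk [((70, 90), [c0, p0]), ((90, 100), [c1, p1]), ((100, 110), [c2, p2]),
    ((110, 120), [c3, p3]), ((120, 130), [c4, p4]), ((130, 140), [c5, p5]),
    ((140, 150), [c6, p6]), ((150, 220), [c7, p7])]

-- joint loop invariant: from matching states, A's dict fold and B's array fold stay matched
set_option maxHeartbeats 4000000 in
lemma main_inv : ∀ (l : List (Int × Int)) (c0 c1 c2 c3 c4 c5 c6 c7 p0 p1 p2 p3 p4 p5 p6 p7 : Int),
    ∃ d0 d1 d2 d3 d4 d5 d6 d7 q0 q1 q2 q3 q4 q5 q6 q7 : Int,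
      l.foldl bStep ([c0, c1, c2, c3, c4, c5, c6, c7], [p0, p1, p2, p3, p4, p5, p6, p7]) =
        ([d0, d1, d2, d3, d4, d5, d6, d7], [q0, q1, q2, q3, q4, q5, q6, q7]) ∧
      l.foldl aStep (mkD c0 c1 c2 c3 c4 c5 c6 c7 p0 p1 p2 p3 p4 p5 p6 p7) =
        mkD d0 d1 d2 d3 d4 d5 d6 d7 q0 q1 q2 q3 q4 q5 q6 q7 := by
  intro l
  induction l with
  | nil =>
    intro c0 c1 c2 c3 c4 c5 c6 c7 p0 p1 p2 p3 p4 p5 p6 p7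
    exact ⟨c0, c1, c2, c3, c4, c5, c6, c7, p0, p1, p2, p3, p4, p5, p6, p7, rfl, rfl⟩
  | cons el t ih =>
    intro c0 c1 c2 c3 c4 c5 c6 c7 p0 p1 p2 p3 p4 p5 p6 p7
    obtain ⟨x, w⟩ := el
    rcases (by omega :
        x ≤ 70 ∨
        (70 < x ∧ x ≤ 90) ∨
        (90 < x ∧ x ≤ 100) ∨
        (100 < x ∧ x ≤ 110) ∨
        (110 < x ∧ x ≤ 120) ∨
        (120 < x ∧ x ≤ 130) ∨
        (130 < x ∧ x ≤ 140) ∨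
        (140 < x ∧ x ≤ 150) ∨
        (150 < x ∧ x ≤ 220) ∨
        220 < x) with
      h | h | h | h | h | h | h | h | h | h
    · -- x ≤ 70
      have hb : bStep ([c0, c1, c2, c3, c4, c5, c6, c7], [p0, p1, p2, p3, p4, p5, p6, p7]) (x, w) = ([c0, c1, c2, c3, c4, c5, c6, c7], [p0, p1, p2, p3, p4, p5, p6, p7]) := by
        unfold bStep; rw [if_pos (by omega)]
      have ha : aStep (mkD c0 c1 c2 c3 c4 c5 c6 c7 p0 p1 p2 p3 p4 p5 p6 p7) (x, w) = mkD c0 c1 c2 c3 c4 c5 c6 c7 p0 p1 p2 p3 p4 p5 p6 p7 := by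
        show List.foldl _ _ [((70:Int), (90:Int)), (90, 100), (100, 110), (110, 120),
          (120, 130), (130, 140), (140, 150), (150, 220)] = _
        simp only [List.foldl]
        rw [if_neg (by omega), if_neg (by omega), if_neg (by omega), if_neg (by omega), if_neg (by omega), if_neg (by omega), if_neg (by omega), if_neg (by omega)]
      rw [List.foldl_cons, List.foldl_cons, hb, ha]
      exact ih _ _ _ _ _ _ _ _ _ _ _ _ _ _ _ _
    · -- 70 < x ≤ 90
      have hidx : bIdx x = 0 := by
        unfold bIdx; rw [if_pos (by omega)]
      have hb : bStep ([c0, c1, c2, c3, c4, c5, c6, c7], [p0, p1, p2, p3, p4, p5, p6, p7]) (x, w) = ([(c0 + 1), c1, c2, c3, c4, c5, c6, c7], [(p0 + w), p1, p2, p3, p4, p5, p6, p7]) := by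
        unfold bStep; rw [if_neg (by omega), hidx]; rfl
      have ha : aStep (mkD c0 c1 c2 c3 c4 c5 c6 c7 p0 p1 p2 p3 p4 p5 p6 p7) (x, w) = mkD (c0 + 1) c1 c2 c3 c4 c5 c6 c7 (p0 + w) p1 p2 p3 p4 p5 p6 p7 := by
        show List.foldl _ _ [((70:Int), (90:Int)), (90, 100), (100, 110), (110, 120),
          (120, 130), (130, 140), (140, 150), (150, 220)] = _
        simp only [List.foldl]
        rw [if_neg (by omega), if_neg (by omega), if_neg (by omega), if_neg (by omega), if_neg (by omega), if_neg (by omega), if_neg (by omega), if_pos (by omega)]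
        rfl
      rw [List.foldl_cons, List.foldl_cons, hb, ha]
      exact ih _ _ _ _ _ _ _ _ _ _ _ _ _ _ _ _
    · -- 90 < x ≤ 100
      have hidx : bIdx x = 1 := by
        unfold bIdx; rw [if_neg (by omega), if_pos (by omega),
          PySem.Int.floordiv_eq_ediv_of_pos] <;> omega
      have hb : bStep ([c0, c1, c2, c3, c4, c5, c6, c7], [p0, p1, p2, p3, p4, p5, p6, p7]) (x, w) = ([c0, (c1 + 1), c2, c3, c4, c5, c6, c7], [p0, (p1 + w), p2, p3, p4, p5, p6, p7]) := by
        unfold bStep; rw [if_neg (by omega), hidx]; rfl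
      have ha : aStep (mkD c0 c1 c2 c3 c4 c5 c6 c7 p0 p1 p2 p3 p4 p5 p6 p7) (x, w) = mkD c0 (c1 + 1) c2 c3 c4 c5 c6 c7 p0 (p1 + w) p2 p3 p4 p5 p6 p7 := by
        show List.foldl _ _ [((70:Int), (90:Int)), (90, 100), (100, 110), (110, 120),
          (120, 130), (130, 140), (140, 150), (150, 220)] = _
        simp only [List.foldl]
        rw [if_neg (by omega), if_neg (by omega), if_neg (by omega), if_neg (by omega), if_neg (by omega), if_neg (by omega), if_pos (by omega), if_neg (by omega)]
        rfl
      rw [List.foldl_cons, List.foldl_cons, hb, ha]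
      exact ih _ _ _ _ _ _ _ _ _ _ _ _ _ _ _ _
    · -- 100 < x ≤ 110
      have hidx : bIdx x = 2 := by
        unfold bIdx; rw [if_neg (by omega), if_pos (by omega),
          PySem.Int.floordiv_eq_ediv_of_pos] <;> omega
      have hb : bStep ([c0, c1, c2, c3, c4, c5, c6, c7], [p0, p1, p2, p3, p4, p5, p6, p7]) (x, w) = ([c0, c1, (c2 + 1), c3, c4, c5, c6, c7], [p0, p1, (p2 + w), p3, p4, p5, p6, p7]) := by
        unfold bStep; rw [if_neg (by omega), hidx]; rfl
      have ha : aStep (mkD c0 c1 c2 c3 c4 c5 c6 c7 p0 p1 p2 p3 p4 p5 p6 p7) (x, w) = mkD c0 c1 (c2 + 1) c3 c4 c5 c6 c7 p0 p1 (p2 + w) p3 p4 p5 p6 p7 := by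
        show List.foldl _ _ [((70:Int), (90:Int)), (90, 100), (100, 110), (110, 120),
          (120, 130), (130, 140), (140, 150), (150, 220)] = _
        simp only [List.foldl]
        rw [if_neg (by omega), if_neg (by omega), if_neg (by omega), if_neg (by omega), if_neg (by omega), if_pos (by omega), if_neg (by omega), if_neg (by omega)]
        rfl
      rw [List.foldl_cons, List.foldl_cons, hb, ha]
      exact ih _ _ _ _ _ _ _ _ _ _ _ _ _ _ _ _
    · -- 110 < x ≤ 120
      have hidx : bIdx x = 3 := by
        unfold bIdx; rw [if_neg (by omega), if_pos (by omega),
          PySem.Int.floordiv_eq_ediv_of_pos] <;> omega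
      have hb : bStep ([c0, c1, c2, c3, c4, c5, c6, c7], [p0, p1, p2, p3, p4, p5, p6, p7]) (x, w) = ([c0, c1, c2, (c3 + 1), c4, c5, c6, c7], [p0, p1, p2, (p3 + w), p4, p5, p6, p7]) := by
        unfold bStep; rw [if_neg (by omega), hidx]; rfl
      have ha : aStep (mkD c0 c1 c2 c3 c4 c5 c6 c7 p0 p1 p2 p3 p4 p5 p6 p7) (x, w) = mkD c0 c1 c2 (c3 + 1) c4 c5 c6 c7 p0 p1 p2 (p3 + w) p4 p5 p6 p7 := by
        show List.foldl _ _ [((70:Int), (90:Int)), (90, 100), (100, 110), (110, 120),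
          (120, 130), (130, 140), (140, 150), (150, 220)] = _
        simp only [List.foldl]
        rw [if_neg (by omega), if_neg (by omega), if_neg (by omega), if_neg (by omega), if_pos (by omega), if_neg (by omega), if_neg (by omega), if_neg (by omega)]
        rfl
      rw [List.foldl_cons, List.foldl_cons, hb, ha]
      exact ih _ _ _ _ _ _ _ _ _ _ _ _ _ _ _ _
    · -- 120 < x ≤ 130
      have hidx : bIdx x = 4 := by
        unfold bIdx; rw [if_neg (by omega), if_pos (by omega),
          PySem.Int.floordiv_eq_ediv_of_pos] <;> omega
      have hb : bStep ([c0, c1, c2, c3, c4, c5, c6, c7], [p0, p1, p2, p3, p4, p5, p6, p7]) (x, w) = ([c0, c1, c2, c3, (c4 + 1), c5, c6, c7], [p0, p1, p2, p3, (p4 + w), p5, p6, p7]) := by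
        unfold bStep; rw [if_neg (by omega), hidx]; rfl
      have ha : aStep (mkD c0 c1 c2 c3 c4 c5 c6 c7 p0 p1 p2 p3 p4 p5 p6 p7) (x, w) = mkD c0 c1 c2 c3 (c4 + 1) c5 c6 c7 p0 p1 p2 p3 (p4 + w) p5 p6 p7 := by
        show List.foldl _ _ [((70:Int), (90:Int)), (90, 100), (100, 110), (110, 120),
          (120, 130), (130, 140), (140, 150), (150, 220)] = _
        simp only [List.foldl]
        rw [if_neg (by omega), if_neg (by omega), if_neg (by omega), if_pos (by omega), if_neg (by omega), if_neg (by omega), if_neg (by omega), if_neg (by omega)]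
        rfl
      rw [List.foldl_cons, List.foldl_cons, hb, ha]
      exact ih _ _ _ _ _ _ _ _ _ _ _ _ _ _ _ _
    · -- 130 < x ≤ 140
      have hidx : bIdx x = 5 := by
        unfold bIdx; rw [if_neg (by omega), if_pos (by omega),
          PySem.Int.floordiv_eq_ediv_of_pos] <;> omega
      have hb : bStep ([c0, c1, c2, c3, c4, c5, c6, c7], [p0, p1, p2, p3, p4, p5, p6, p7]) (x, w) = ([c0, c1, c2, c3, c4, (c5 + 1), c6, c7], [p0, p1, p2, p3, p4, (p5 + w), p6, p7]) := by
        unfold bStep; rw [if_neg (by omega), hidx]; rfl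
      have ha : aStep (mkD c0 c1 c2 c3 c4 c5 c6 c7 p0 p1 p2 p3 p4 p5 p6 p7) (x, w) = mkD c0 c1 c2 c3 c4 (c5 + 1) c6 c7 p0 p1 p2 p3 p4 (p5 + w) p6 p7 := by
        show List.foldl _ _ [((70:Int), (90:Int)), (90, 100), (100, 110), (110, 120),
          (120, 130), (130, 140), (140, 150), (150, 220)] = _
        simp only [List.foldl]
        rw [if_neg (by omega), if_neg (by omega), if_pos (by omega), if_neg (by omega), if_neg (by omega), if_neg (by omega), if_neg (by omega), if_neg (by omega)]
        rfl
      rw [List.foldl_cons, List.foldl_cons, hb, ha]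
      exact ih _ _ _ _ _ _ _ _ _ _ _ _ _ _ _ _
    · -- 140 < x ≤ 150
      have hidx : bIdx x = 6 := by
        unfold bIdx; rw [if_neg (by omega), if_pos (by omega),
          PySem.Int.floordiv_eq_ediv_of_pos] <;> omega
      have hb : bStep ([c0, c1, c2, c3, c4, c5, c6, c7], [p0, p1, p2, p3, p4, p5, p6, p7]) (x, w) = ([c0, c1, c2, c3, c4, c5, (c6 + 1), c7], [p0, p1, p2, p3, p4, p5, (p6 + w), p7]) := by
        unfold bStep; rw [if_neg (by omega), hidx]; rfl
      have ha : aStep (mkD c0 c1 c2 c3 c4 c5 c6 c7 p0 p1 p2 p3 p4 p5 p6 p7) (x, w) = mkD c0 c1 c2 c3 c4 c5 (c6 + 1) c7 p0 p1 p2 p3 p4 p5 (p6 + w) p7 := by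
        show List.foldl _ _ [((70:Int), (90:Int)), (90, 100), (100, 110), (110, 120),
          (120, 130), (130, 140), (140, 150), (150, 220)] = _
        simp only [List.foldl]
        rw [if_neg (by omega), if_pos (by omega), if_neg (by omega), if_neg (by omega), if_neg (by omega), if_neg (by omega), if_neg (by omega), if_neg (by omega)]
        rfl
      rw [List.foldl_cons, List.foldl_cons, hb, ha]
      exact ih _ _ _ _ _ _ _ _ _ _ _ _ _ _ _ _
    · -- 150 < x ≤ 220
      have hidx : bIdx x = 7 := by
        unfold bIdx; rw [if_neg (by omega), if_neg (by omega)]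
      have hb : bStep ([c0, c1, c2, c3, c4, c5, c6, c7], [p0, p1, p2, p3, p4, p5, p6, p7]) (x, w) = ([c0, c1, c2, c3, c4, c5, c6, (c7 + 1)], [p0, p1, p2, p3, p4, p5, p6, (p7 + w)]) := by
        unfold bStep; rw [if_neg (by omega), hidx]; rfl
      have ha : aStep (mkD c0 c1 c2 c3 c4 c5 c6 c7 p0 p1 p2 p3 p4 p5 p6 p7) (x, w) = mkD c0 c1 c2 c3 c4 c5 c6 (c7 + 1) p0 p1 p2 p3 p4 p5 p6 (p7 + w) := by
        show List.foldl _ _ [((70:Int), (90:Int)), (90, 100), (100, 110), (110, 120),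
          (120, 130), (130, 140), (140, 150), (150, 220)] = _
        simp only [List.foldl]
        rw [if_pos (by omega), if_neg (by omega), if_neg (by omega), if_neg (by omega), if_neg (by omega), if_neg (by omega), if_neg (by omega), if_neg (by omega)]
        rfl
      rw [List.foldl_cons, List.foldl_cons, hb, ha]
      exact ih _ _ _ _ _ _ _ _ _ _ _ _ _ _ _ _
    · -- 220 < x
      have hb : bStep ([c0, c1, c2, c3, c4, c5, c6, c7], [p0, p1, p2, p3, p4, p5, p6, p7]) (x, w) = ([c0, c1, c2, c3, c4, c5, c6, c7], [p0, p1, p2, p3, p4, p5, p6, p7]) := by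
        unfold bStep; rw [if_pos (by omega)]
      have ha : aStep (mkD c0 c1 c2 c3 c4 c5 c6 c7 p0 p1 p2 p3 p4 p5 p6 p7) (x, w) = mkD c0 c1 c2 c3 c4 c5 c6 c7 p0 p1 p2 p3 p4 p5 p6 p7 := by
        show List.foldl _ _ [((70:Int), (90:Int)), (90, 100), (100, 110), (110, 120),
          (120, 130), (130, 140), (140, 150), (150, 220)] = _
        simp only [List.foldl]
        rw [if_neg (by omega), if_neg (by omega), if_neg (by omega), if_neg (by omega), if_neg (by omega), if_neg (by omega), if_neg (by omega), if_neg (by omega)]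
      rw [List.foldl_cons, List.foldl_cons, hb, ha]
      exact ih _ _ _ _ _ _ _ _ _ _ _ _ _ _ _ _

-- ===== VERDICT (by name: the statement is the Claim_ definition above) =====
set_option maxHeartbeats 4000000 in
theorem new_func_spec : Claim_equal_new_func := by
  intro l _
  unfold Spec_new_func
  show (l.foldl aStep (PySem.Dict.ofList [(((70:Int), (90:Int)), [(0:Int), 0]), ((90, 100), [0, 0]),
      ((100, 110), [0, 0]), ((110, 120), [0, 0]), ((120, 130), [0, 0]), ((130, 140), [0, 0]),
      ((140, 150), [0, 0]), ((150, 220), [0, 0])])).items.map (fun kv => (kv.1.1, kv.1.2, kv.2)) =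
    (fun s : List Int × List Int => (bKeys.zip (s.1.zip s.2)).map (fun t => (t.1.1, t.1.2, [t.2.1, t.2.2])))
      (l.foldl bStep ([0, 0, 0, 0, 0, 0, 0, 0], [0, 0, 0, 0, 0, 0, 0, 0]))
  obtain ⟨d0, d1, d2, d3, d4, d5, d6, d7, q0, q1, q2, q3, q4, q5, q6, q7, hb, ha⟩ :=
    main_inv l 0 0 0 0 0 0 0 0 0 0 0 0 0 0 0 0
  rw [show PySem.Dict.ofList [(((70:Int), (90:Int)), [(0:Int), 0]), ((90, 100), [0, 0]),
      ((100, 110), [0, 0]), ((110, 120), [0, 0]), ((120, 130), [0, 0]), ((130, 140), [0, 0]),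
      ((140, 150), [0, 0]), ((150, 220), [0, 0])] = mkD 0 0 0 0 0 0 0 0 0 0 0 0 0 0 0 0 from rfl,
    ha, hb]
  rfl
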